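/- GENERATED by mk_final_copies.py from the proof of the farm's unit `vorbis_finish_frame.2` (farm:vorbis_finish_frame.2.1: Proof.lean) as the
   re-elaboration sweep compiled it — do not edit. -/
import Asan.CheckWalk
import Vorbis.Spec.Units.vorbis_finish_frame_2

open X86 X86.User Asan Vorbis Vorbis.Spec

set_option maxRecDepth 4000
set_option maxHeartbeats 4000000

namespace Vorbis.Spec.vorbis_finish_frame_2

/-- `shl r, 2` as a number. -/
theorem seg2_shl2 (x : Word) (h : x.toNat * 4 < 2 ^ 64) : (x <<< 2).toNat = x.toNat * 4 := by
  rw [UInt64.toNat_shiftLeft]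
  have e2 : (2 : Word).toNat % 64 = 2 := rfl
  rw [e2, Nat.shiftLeft_eq]
  omega

/-- The address of element `i` of a 16-entry pointer array of `*f` at offset `off`, as the walker leaves it
(`[rbx + (i + off/8 − 1)*8 + 8]`). -/
theorem seg2_elem_addr (f i k : Nat) (X : Word) (hX : X.toNat = i) (hi : i < 16) (hk : k < 1000) (hf : f < 2 ^ 32) :
    addr f + (X + UInt64.ofNat k) * 8 + 8 = addr (f + (8 * k + 8) + 8 * i) := by
  apply eq_addr
  have e8 : (8 : Word).toNat = 8 := rfl
  have hfa : (addr f).toNat = f := toNat_addr f (by omega)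
  rw [UInt64.toNat_add, UInt64.toNat_add, UInt64.toNat_mul, UInt64.toNat_add, hX, e8, hfa, UInt64.toNat_ofNat']
  omega

/-- A 4-byte store at `P` does not change a read of a range that misses it. -/
theorem seg2_read_skip (m : Mem) (P : Word) (v : Nat) (b : Word) (k : Nat) (hP : P.toNat + 4 ≤ 2 ^ 64)
    (hb : b.toNat + k ≤ 2 ^ 64) (hd : b.toNat + k ≤ P.toNat ∨ P.toNat + 4 ≤ b.toNat) :
    (m.writeLE P 4 v).readLE b k = m.readLE b k :=
  X86.User.Mem.readLE_writeLE_disjoint_noWrap m P 4 v b k hP hb hd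

end Vorbis.Spec.vorbis_finish_frame_2

/-- Segment 2 of `vorbis_finish_frame`: one step of the flattened mixing loop. -/
theorem Vorbis.Spec.Worked.vorbis_finish_frame_2_ok : Vorbis.Spec.vorbis_finish_frame_2.Statement := by
  intro Lay hLay μ hμ u₀ hcode hload4 hload8 others frames len A stored room ysz u ret f i j n wp s hat
  have he := hat.frame.entry
  have he0 := he
  have hsh := hat.frame.shadow
  have hr := hat.frame.rdi
  have hfp := hat.frame.fin
  have hinv0 := hat.frame.inv0
  v_entry he
  have hsp := hsh.rsp
  have hwhere := hinv0.objLive.where_ hsh.inv hsh.offText (by simp only [Vorbis.Off.sizeof.stb_vorbis]; omega)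
  simp only [Vorbis.Off.sizeof.stb_vorbis] at hwhere
  have hfa : (addr f).toNat = f := toNat_addr f (by omega)
  have har : A.B ≤ f ∧ f + 1808 ≤ A.B + A.L := by
    have hbr := hinv0.arena.block_range (p := f) (n := Off.sizeof.stb_vorbis) hinv0.obj
    have hl := le_r8 Off.sizeof.stb_vorbis
    have h2 := hinv0.arena.AR2
    simp only [Vorbis.Off.sizeof.stb_vorbis] at hbr hl
    omega
  obtain ⟨j_rip, hfr, j_r12, hsi, hsn, hsw, hneq, hilt, hjle, hnle, hwin, hinv, hobj⟩ := hat
  obtain ⟨_, _, _, _, _, j_rsp, j_rbx, j_eq, habi, hs0, hs1, hs2, hs3, hs4, hs5, hs6, hlen, hright, hleft, hsame, hun, hacc⟩ := hfr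
  have hdf : s.flags .df = false := habi.1
  have hmx : s.mxcsr &&& 0x1F80 = 0x1F80 := habi.2
  have hsse : SseOK s := sseOK_of_abiInv habi
  have w_rip := j_rip
  have w_eq := j_eq
  have w_r12 := j_r12
  -- bounds of the ghosts
  have hcfg0 := Real.VorbisOK.config hinv0.fb.vorbis
  have hc16 : stb_vorbis.channels u.mem f ≤ 16 := hcfg0.header.HD1.2
  have hi16 : i < 16 := by omega
  have hd3 := (hcfg0.header.HD3).toMdct
  have hb1f := hd3.b1.facts
  have hn4 : n ≤ 4096 := by omega
  -- the sign-extended index `i` as a number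
  have hX : (Word.ofBV (BitVec.signExtend 64 (BitVec.ofNat 32 i))).toNat = i := by
    rw [toNat_sext32 _ (by rw [BitVec.toNat_ofNat]; omega), BitVec.toNat_ofNat]
    omega
  -- the window block is live
  have hwlive : LiveBytes others frames wp (4 * n) :=
    LiveBytes.of_block (hinv0.fb.env.live _ hwin) (Nat.le_refl _) (Nat.le_refl _)
  have hwin_in := hinv0.fb.env.ok.inside _ hwin
  simp only [] at hwin_in
  -- the two pointers `channel_buffers[i]`, `previous_window[i]`, at the addresses the walker will compute
  have hm6 := hcfg0.m6 i hilt
  obtain ⟨hm6c, hm6p⟩ := hm6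
  simp only [vacc, voff] at hm6c hm6p
  unfold Mem.u64 at hm6c hm6p
  have hcblive : LiveBytes others frames (u.mem.readLE (addr (f + 872 + 8 * i)) 8) (4 * bsize u.mem f 1) :=
    LiveBytes.of_block (hinv0.fb.env.live _ hm6c) (Nat.le_refl _) (Nat.le_refl _)
  have hpwlive : LiveBytes others frames (u.mem.readLE (addr (f + 1128 + 8 * i)) 8) (2 * bsize u.mem f 1) :=
    LiveBytes.of_block (hinv0.fb.env.live _ hm6p) (Nat.le_refl _) (Nat.le_refl _)
  have hcb_in := hinv0.fb.env.ok.inside _ hm6c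
  have hpw_in := hinv0.fb.env.ok.inside _ hm6p
  have hcboff := hinv0.offStack _ hm6c
  simp only [] at hcb_in hpw_in hcboff
  -- the pointers read the same in the present memory
  have hcbs : s.mem.readLE (addr (f + (872 + 8 * i))) 8 = u.mem.readLE (addr (f + (872 + 8 * i))) 8 :=
    hobj.readLE (872 + 8 * i) 8 (InWins.of_mem (0, 1808) List.mem_cons_self (by omega) (by simp only []; omega))
  have hpws : s.mem.readLE (addr (f + (1128 + 8 * i))) 8 = u.mem.readLE (addr (f + (1128 + 8 * i))) 8 :=
    hobj.readLE (1128 + 8 * i) 8 (InWins.of_mem (0, 1808) List.mem_cons_self (by omega) (by simp only []; omega))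
  obtain ⟨cb, rcb⟩ : ∃ cb, u.mem.readLE (addr (f + 872 + 8 * i)) 8 = cb := ⟨_, rfl⟩
  obtain ⟨pw, rpw⟩ : ∃ pw, u.mem.readLE (addr (f + 1128 + 8 * i)) 8 = pw := ⟨_, rfl⟩
  rw [rcb] at hcblive hcb_in hcboff
  rw [rpw] at hpwlive hpw_in
  rw [← Nat.add_assoc, rcb] at hcbs
  rw [← Nat.add_assoc, rpw] at hpws
  clear hm6c hm6p
  -- `left` as a number
  have hleftN : (Word.part .w32 (u.reg .rdx)).toNat < 2 ^ 31 ∧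
      2 * (Word.part .w32 (u.reg .rdx)).toNat ≤ bsize u.mem f 1 := by
    have h1 := hfp.left_nonneg
    have h2 := hfp.left_half
    have hb := hd3.blocksize_1_eq
    have hlt := (Word.part .w32 (u.reg .rdx)).isLt
    rw [hb] at h2
    change 0 ≤ (Word.part .w32 (u.reg .rdx)).toInt at h1
    change (Word.part .w32 (u.reg .rdx)).toInt ≤ _ at h2
    rw [BitVec.toInt_eq_toNat_cond] at h1 h2
    split at h1 <;> omega
  -- the fields of `*f` the segment loads
  obtain ⟨ch, rch⟩ : ∃ ch, s.mem.readLE (addr f + 4) 4 = ch := ⟨_, rfl⟩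
  have hchu : u.mem.readLE (addr f + 4) 4 = ch := by
    have h0 := hobj.readLE 4 4 (by decide)
    rw [← addr_add_lit, rch] at h0
    exact h0.symm
  have hchv : stb_vorbis.channels u.mem f = sint32 ch := by
    simp only [vacc, voff]
    unfold Mem.i32 Mem.u32
    rw [← addr_add_lit, hchu]
  have hchlt : ch < 2 ^ 32 := by
    rw [← rch]
    exact X86.User.Mem.readLE_lt' _ _ 4
  have hhd1 := hcfg0.header.HD1
  have hilt0 := hilt
  rw [hchv] at hhd1 hilt
  have hch : 1 ≤ ch ∧ ch ≤ 16 ∧ sint32 ch = (ch : Int) := by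
    unfold sint32 at hhd1 ⊢
    split at hhd1 <;> omega
  clear hchu
  u_walk hcode [hμ.vendor] until [Vorbis.L.vorbis_finish_frame.cut2, Vorbis.L.vorbis_finish_frame.at_1071ae] span [Vorbis.L.textLo, Vorbis.L.textHi] side (v_side)
  case check_1070d0 =>
    have hun1 : ShadowUntouched s.mem s_1070d0.mem := by v_untouched
    have hun' : ShadowUntouched u.mem s_1070d0.mem := Mem.EqOn.trans hun hun1
    refine hinv0.objLive.accSmall hsh.inv hun' _ 8 (by decide) (by u_omega) ?_
    simp only [Vorbis.Off.sizeof.stb_vorbis]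
    u_omega
  case check_107113 =>
    have hun1 : ShadowUntouched s.mem s_107113.mem := by v_untouched
    have hun' : ShadowUntouched u.mem s_107113.mem := Mem.EqOn.trans hun hun1
    have hpj : (Word.part .w32 (UInt64.ofNat j)).toNat = j := by
      rw [part32_toNat]
      have : (UInt64.ofNat j).toNat = j := by
        rw [UInt64.toNat_ofNat']
        omega
      omega
    have hY : (Word.ofBV (BitVec.signExtend 64 (Word.part .w32 (UInt64.ofNat j)))).toNat = j := by
      rw [toNat_sext32 _ (by omega), hpj]
    have hjlt : j < n := by
      rw [BitVec.toInt_eq_toNat_cond, BitVec.toInt_eq_toNat_cond, hpj, BitVec.toNat_ofNat] at hbr_107189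
      split at hbr_107189 <;> split at hbr_107189 <;> omega
    have hwp : (UInt64.ofNat wp).toNat = wp := by
      rw [UInt64.toNat_ofNat']
      omega
    refine hwlive.accSmall hsh.inv hun' _ 4 (by decide) ?_ ?_
    · rw [add_mul4 _ _ j hY (by omega), hwp]
      omega
    · rw [add_mul4 _ _ j hY (by omega), hwp]
      omega
  case check_1070ec =>
    have hun1 : ShadowUntouched s.mem s_1070ec.mem := by v_untouched
    have hun' : ShadowUntouched u.mem s_1070ec.mem := Mem.EqOn.trans hun hun1
    have hcbaddr : addr f + (Word.ofBV (BitVec.signExtend 64 (BitVec.ofNat 32 i)) + 108) * 8 + 8 = addr (f + 872 + 8 * i) :=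
      Vorbis.Spec.vorbis_finish_frame_2.seg2_elem_addr f i 108 _ hX hi16 (by omega) (by omega)
    rw [hcbaddr, hcbs]
    -- the index `left + j` as a number
    have hjN : (UInt64.ofNat j).toNat = j := by
      rw [UInt64.toNat_ofNat']
      omega
    have hpj : (Word.part .w32 (UInt64.ofNat j)).toNat = j := by
      rw [part32_toNat]
      omega
    have hjlt : j < n := by
      rw [BitVec.toInt_eq_toNat_cond, BitVec.toInt_eq_toNat_cond, hpj, BitVec.toNat_ofNat] at hbr_107189
      split at hbr_107189 <;> split at hbr_107189 <;> omega
    have hidx : (BitVec.setWidth 32 (UInt64.ofNat j + Word.ofBV (Word.part .w32 (u.reg .rdx))).toBitVec).toNat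
        = j + (Word.part .w32 (u.reg .rdx)).toNat := by
      rw [BitVec.toNat_setWidth, UInt64.toNat_toBitVec, UInt64.toNat_add, toNat_ofBV32, hjN]
      omega
    have hsx : (Word.ofBV (BitVec.signExtend 64
        (BitVec.setWidth 32 (UInt64.ofNat j + Word.ofBV (Word.part .w32 (u.reg .rdx))).toBitVec))).toNat
        = j + (Word.part .w32 (u.reg .rdx)).toNat := by
      rw [toNat_sext32 _ (by omega), hidx]
    have hcbN : (UInt64.ofNat cb).toNat = cb := by
      rw [UInt64.toNat_ofNat']
      omega
    have haddr : (Word.ofBV (BitVec.signExtend 64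
        (BitVec.setWidth 32 (UInt64.ofNat j + Word.ofBV (Word.part .w32 (u.reg .rdx))).toBitVec)) <<< 2
        + UInt64.ofNat cb).toNat = cb + 4 * (j + (Word.part .w32 (u.reg .rdx)).toNat) := by
      rw [UInt64.toNat_add, Vorbis.Spec.vorbis_finish_frame_2.seg2_shl2 _ (by omega), hsx, hcbN]
      omega
    refine hcblive.accSmall hsh.inv hun' _ 4 (by decide) ?_ ?_
    · rw [haddr]
      omega
    · rw [haddr]
      omega
  case check_107138 =>
    have hun1 : ShadowUntouched s.mem s_107138.mem := by v_untouched
    have hun' : ShadowUntouched u.mem s_107138.mem := Mem.EqOn.trans hun hun1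
    refine hinv0.objLive.accSmall hsh.inv hun' _ 8 (by decide) (by u_omega) ?_
    simp only [Vorbis.Off.sizeof.stb_vorbis]
    u_omega
  case check_107198 =>
    have hun1 : ShadowUntouched s.mem s_107198.mem := by v_untouched
    have hun' : ShadowUntouched u.mem s_107198.mem := Mem.EqOn.trans hun hun1
    refine hinv0.objLive.accSmall hsh.inv hun' _ 4 (by decide) (by u_omega) ?_
    simp only [Vorbis.Off.sizeof.stb_vorbis]
    u_omega
  case check_107145 =>
    have hun1 : ShadowUntouched s.mem s_107145.mem := by v_untouched
    have hun' : ShadowUntouched u.mem s_107145.mem := Mem.EqOn.trans hun hun1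
    have hpwaddr : addr f + (Word.ofBV (BitVec.signExtend 64 (BitVec.ofNat 32 i)) + 140) * 8 + 8 = addr (f + 1128 + 8 * i) :=
      Vorbis.Spec.vorbis_finish_frame_2.seg2_elem_addr f i 140 _ hX hi16 (by omega) (by omega)
    rw [hpwaddr, hpws]
    have hpj : (Word.part .w32 (UInt64.ofNat j)).toNat = j := by
      rw [part32_toNat]
      have : (UInt64.ofNat j).toNat = j := by
        rw [UInt64.toNat_ofNat']
        omega
      omega
    have hY : (Word.ofBV (BitVec.signExtend 64 (Word.part .w32 (UInt64.ofNat j)))).toNat = j := by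
      rw [toNat_sext32 _ (by omega), hpj]
    have hjlt : j < n := by
      rw [BitVec.toInt_eq_toNat_cond, BitVec.toInt_eq_toNat_cond, hpj, BitVec.toNat_ofNat] at hbr_107189
      split at hbr_107189 <;> split at hbr_107189 <;> omega
    have hpwN : (UInt64.ofNat pw).toNat = pw := by
      rw [UInt64.toNat_ofNat']
      omega
    have e4 : (4 : Word).toNat = 4 := rfl
    have haddr : (Word.ofBV (BitVec.signExtend 64 (Word.part .w32 (UInt64.ofNat j))) * 4 + UInt64.ofNat pw).toNat
        = pw + 4 * j := by
      rw [UInt64.toNat_add, UInt64.toNat_mul, hY, hpwN, e4]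
      omega
    refine hpwlive.accSmall hsh.inv hun' _ 4 (by decide) ?_ ?_
    · rw [haddr]
      omega
    · rw [haddr]
      omega
  case check_107166 =>
    have hun1 : ShadowUntouched s.mem s_107166.mem := by v_untouched
    have hun' : ShadowUntouched u.mem s_107166.mem := Mem.EqOn.trans hun hun1
    have hpj : (Word.part .w32 (UInt64.ofNat j)).toNat = j := by
      rw [part32_toNat]
      have : (UInt64.ofNat j).toNat = j := by
        rw [UInt64.toNat_ofNat']
        omega
      omega
    have hjlt : j < n := by
      rw [BitVec.toInt_eq_toNat_cond, BitVec.toInt_eq_toNat_cond, hpj, BitVec.toNat_ofNat] at hbr_107189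
      split at hbr_107189 <;> split at hbr_107189 <;> omega
    have e1 : (1 : Word).toNat = 1 := rfl
    have hidx : (BitVec.setWidth 32 (Word.ofBV (BitVec.ofNat 32 n) - 1).toBitVec - Word.part .w32 (UInt64.ofNat j)).toNat
        = n - 1 - j := by
      rw [BitVec.toNat_sub, BitVec.toNat_setWidth, UInt64.toNat_toBitVec, UInt64.toNat_sub, toNat_ofBV32, BitVec.toNat_ofNat, hpj, e1]
      omega
    have hsx : (Word.ofBV (BitVec.signExtend 64
        (BitVec.setWidth 32 (Word.ofBV (BitVec.ofNat 32 n) - 1).toBitVec - Word.part .w32 (UInt64.ofNat j)))).toNat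
        = n - 1 - j := by
      rw [toNat_sext32 _ (by omega), hidx]
    have hwp : (UInt64.ofNat wp).toNat = wp := by
      rw [UInt64.toNat_ofNat']
      omega
    refine hwlive.accSmall hsh.inv hun' _ 4 (by decide) ?_ ?_
    · rw [add_mul4 _ _ (n - 1 - j) hsx (by omega), hwp]
      omega
    · rw [add_mul4 _ _ (n - 1 - j) hsx (by omega), hwp]
      omega
  case side_code =>
    have hcbaddr : addr f + (Word.ofBV (BitVec.signExtend 64 (BitVec.ofNat 32 i)) + 108) * 8 + 8 = addr (f + 872 + 8 * i) :=
      Vorbis.Spec.vorbis_finish_frame_2.seg2_elem_addr f i 108 _ hX hi16 (by omega) (by omega)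
    rw [hcbaddr, hcbs]
    -- the index `left + j` as a number
    have hjN : (UInt64.ofNat j).toNat = j := by
      rw [UInt64.toNat_ofNat']
      omega
    have hpj : (Word.part .w32 (UInt64.ofNat j)).toNat = j := by
      rw [part32_toNat]
      omega
    have hjlt : j < n := by
      rw [BitVec.toInt_eq_toNat_cond, BitVec.toInt_eq_toNat_cond, hpj, BitVec.toNat_ofNat] at hbr_107189
      split at hbr_107189 <;> split at hbr_107189 <;> omega
    have hidx : (BitVec.setWidth 32 (UInt64.ofNat j + Word.ofBV (Word.part .w32 (u.reg .rdx))).toBitVec).toNat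
        = j + (Word.part .w32 (u.reg .rdx)).toNat := by
      rw [BitVec.toNat_setWidth, UInt64.toNat_toBitVec, UInt64.toNat_add, toNat_ofBV32, hjN]
      omega
    have hsx : (Word.ofBV (BitVec.signExtend 64
        (BitVec.setWidth 32 (UInt64.ofNat j + Word.ofBV (Word.part .w32 (u.reg .rdx))).toBitVec))).toNat
        = j + (Word.part .w32 (u.reg .rdx)).toNat := by
      rw [toNat_sext32 _ (by omega), hidx]
    have hcbN : (UInt64.ofNat cb).toNat = cb := by
      rw [UInt64.toNat_ofNat']
      omega
    have haddr : (Word.ofBV (BitVec.signExtend 64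
        (BitVec.setWidth 32 (UInt64.ofNat j + Word.ofBV (Word.part .w32 (u.reg .rdx))).toBitVec)) <<< 2
        + UInt64.ofNat cb).toNat = cb + 4 * (j + (Word.part .w32 (u.reg .rdx)).toNat) := by
      rw [UInt64.toNat_add, Vorbis.Spec.vorbis_finish_frame_2.seg2_shl2 _ (by omega), hsx, hcbN]
      omega
    have hcbw := hcblive.where_ hsh.inv hsh.offText (by omega) (by omega)
    right
    rw [haddr]
    omega
  · -- the body: back to the head at `(i, j + 1)`
    clear w_r13 w_r14 w_rdi w_r15
    try clear w_zmm
    refine ReachVia.done (Or.inl ?_)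
    have hcbaddr : addr f + (Word.ofBV (BitVec.signExtend 64 (BitVec.ofNat 32 i)) + 108) * 8 + 8 = addr (f + 872 + 8 * i) :=
      Vorbis.Spec.vorbis_finish_frame_2.seg2_elem_addr f i 108 _ hX hi16 (by omega) (by omega)
    rw [hcbaddr, hcbs] at w_mem
    -- the index `left + j` as a number
    have hjN : (UInt64.ofNat j).toNat = j := by
      rw [UInt64.toNat_ofNat']
      omega
    have hpj : (Word.part .w32 (UInt64.ofNat j)).toNat = j := by
      rw [part32_toNat]
      omega
    have hjlt : j < n := by
      rw [BitVec.toInt_eq_toNat_cond, BitVec.toInt_eq_toNat_cond, hpj, BitVec.toNat_ofNat] at hbr_107189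
      split at hbr_107189 <;> split at hbr_107189 <;> omega
    have hidx : (BitVec.setWidth 32 (UInt64.ofNat j + Word.ofBV (Word.part .w32 (u.reg .rdx))).toBitVec).toNat
        = j + (Word.part .w32 (u.reg .rdx)).toNat := by
      rw [BitVec.toNat_setWidth, UInt64.toNat_toBitVec, UInt64.toNat_add, toNat_ofBV32, hjN]
      omega
    have hsx : (Word.ofBV (BitVec.signExtend 64
        (BitVec.setWidth 32 (UInt64.ofNat j + Word.ofBV (Word.part .w32 (u.reg .rdx))).toBitVec))).toNat
        = j + (Word.part .w32 (u.reg .rdx)).toNat := by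
      rw [toNat_sext32 _ (by omega), hidx]
    have hcbN : (UInt64.ofNat cb).toNat = cb := by
      rw [UInt64.toNat_ofNat']
      omega
    have haddr : (Word.ofBV (BitVec.signExtend 64
        (BitVec.setWidth 32 (UInt64.ofNat j + Word.ofBV (Word.part .w32 (u.reg .rdx))).toBitVec)) <<< 2
        + UInt64.ofNat cb).toNat = cb + 4 * (j + (Word.part .w32 (u.reg .rdx)).toNat) := by
      rw [UInt64.toNat_add, Vorbis.Spec.vorbis_finish_frame_2.seg2_shl2 _ (by omega), hsx, hcbN]
      omega
    generalize hP : Word.ofBV (BitVec.signExtend 64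
        (BitVec.setWidth 32 (UInt64.ofNat j + Word.ofBV (Word.part .w32 (u.reg .rdx))).toBitVec)) <<< 2
        + UInt64.ofNat cb = P at w_mem haddr
    obtain ⟨lf, hlf⟩ : ∃ lf, (Word.part .w32 (u.reg .rdx)).toNat = lf := ⟨_, rfl⟩
    rw [hlf] at haddr hleftN
    -- the sample buffer `channel_buffers[i]` in the present memory
    have hbs : bsize s.mem f 1 = bsize u.mem f 1 := (Mdct.ReadsEq.of_objEq (hobj.sub (by decide))).bsize 1
    have hchs : stb_vorbis.channels s.mem f = stb_vorbis.channels u.mem f := by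
      simp only [vacc, voff]
      exact hobj.i32 4 (by decide)
    have hC : SampleBuf (RunBlk A len) s.mem f ⟨cb, 4 * bsize u.mem f 1⟩ := by
      have h := SampleBuf.chan (Blk := RunBlk A len) (mem := s.mem) (f := f) i (by rw [hchs]; exact hilt0)
      simp only [vacc, voff] at h
      unfold Mem.u64 at h
      rw [hcbs, hbs] at h
      exact h
    have hdisj := hinv.sep.bufobj _ hC
    simp only [vblock, voff, Block.disjoint] at hdisj
    -- the segment's stores
    have hst : Mem.SameExcept [⟨(u.reg .rsp).toNat - 144, (u.reg .rsp).toNat⟩, ⟨cb + 4 * (j + lf), cb + 4 * (j + lf) + 4⟩]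
        s.mem s_107180.mem := by
      rw [w_mem]
      u_same
    have hun1 : ShadowUntouched s.mem s_107180.mem := by v_untouched
    -- the buffer lies in the arena
    have hbin : A.B ≤ cb ∧ cb + 4 * bsize u.mem f 1 ≤ A.B + A.L := by
      rcases hinv.buf _ hC with h0 | hb
      · simp only [] at h0
        omega
      · have hbr := hinv.arena.block_range (p := cb) (n := 4 * bsize u.mem f 1) hb
        have hl := le_r8 (4 * bsize u.mem f 1)
        have h2 := hinv.arena.AR2
        omega
    have hstep : ObjEq [(0, 1808)] s.mem f s_107180.mem f := by
      apply ObjEq.of_sameExcept hst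
      · intro w hwm
        simp only [List.mem_cons, List.mem_nil_iff, or_false] at hwm
        rcases hwm with rfl
        simp only []
        omega
      · intro w hwm sp hmem
        simp only [List.mem_cons, List.mem_nil_iff, or_false] at hwm hmem
        rcases hwm with rfl
        rcases hmem with rfl | rfl <;> simp only [] <;> omega
    have hobjN : ObjEq [(0, 1808)] u.mem f s_107180.mem f := ObjEq.trans hobj hstep
    have hinvN : DecodeInv others frames len A stored room ysz s_107180.mem f := by
      apply Vorbis.Spec.vorbis_finish_frame.ff_inv_step hinv hst _ _ hun1
        (hinv.fb.vorbis.buffers.M7.transfer (hstep.sub (by decide)))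
      · intro sp hmem
        simp only [List.mem_cons, List.mem_nil_iff, or_false] at hmem
        rcases hmem with rfl | rfl
        · apply StoreOK.off
          intro B hB
          have := hinv.offStack B hB
          simp only []
          omega
        · refine StoreOK.buffer _ hC ?_ ?_
          · simp only []
            omega
          · simp only []
            omega
      · intro sp hmem
        simp only [List.mem_cons, List.mem_nil_iff, or_false] at hmem
        rcases hmem with rfl | rfl <;> simp only [] <;> omega
    have hsameN : Mem.SameExcept [⟨(u.reg .rsp).toNat - 144, (u.reg .rsp).toNat⟩, ⟨A.B, A.B + A.L⟩] u.mem s_107180.mem := by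
      apply hsame.trans
      apply hst.mono
      intro sp hmem
      simp only [List.mem_cons, List.mem_nil_iff, or_false] at hmem
      rcases hmem with rfl | rfl
      · intro a ha1 ha2
        exact ⟨_, List.mem_cons_self, ha1, ha2⟩
      · intro a ha1 ha2
        simp only [] at ha1 ha2
        refine ⟨_, List.mem_cons_of_mem _ List.mem_cons_self, ?_, ?_⟩
        · simp only []
          omega
        · simp only []
          omega
    generalize hM : ((((s.mem.writeLE (u.reg .rsp - 96) 8 1077489).writeLE (u.reg .rsp - 68) 4 x_1070f6.toNat).writeLE
        (u.reg .rsp - 96) 8 1077528).writeLE (u.reg .rsp - 68) 4 x_107123.toNat).writeLE (u.reg .rsp - 96) 8 1077611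
        = M1 at w_mem
    refine ⟨w_rip, ⟨he0, hr, hsh, hinv0, hfp, w_rsp, ?rbx, w_eq, ?abi, ?_, ?_, ?_, ?_, ?_, ?_, ?_, ?_, ?_, ?_, hsameN,
      Mem.EqOn.trans hun hun1, hacc⟩, ?r12, ?si, ?sn, ?sw, hneq, hilt0, hjlt, hnle, hwin, hinvN, hobjN⟩
    case rbx =>
      rw [w_kept.get .rbx rfl]
      exact j_rbx
    case abi => v_inv
    case r12 =>
      rw [w_r12]
      apply eq_addr
      have e1 : (1#32).toNat = 1 := by decide
      rw [toNat_ofBV32, BitVec.toNat_add, hpj, e1]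
      omega
    all_goals
      rw [w_mem, Vorbis.Spec.vorbis_finish_frame_2.seg2_read_skip _ _ _ _ _ (by omega) (by u_omega) (by u_omega), ← hM]
    all_goals u_read
  · -- `++i`, `i + 1 ≥ channels`: the join
    refine ReachVia.done (Or.inr (Or.inr ?_))
    have hst : Mem.SameExcept [⟨(u.reg .rsp).toNat - 144, (u.reg .rsp).toNat⟩] s.mem s_1071a4.mem := by
      rw [w_mem]
      u_same
    have hun1 : ShadowUntouched s.mem s_1071a4.mem := by v_untouched
    have hstep : ObjEq [(0, 1808)] s.mem f s_1071a4.mem f := by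
      apply ObjEq.of_sameExcept hst
      · intro w hwm
        simp only [List.mem_cons, List.mem_nil_iff, or_false] at hwm
        rcases hwm with rfl
        simp only []
        omega
      · intro w hwm sp hmem
        simp only [List.mem_cons, List.mem_nil_iff, or_false] at hwm hmem
        rcases hmem with rfl
        rcases hwm with rfl
        simp only []
        omega
    have hobjN : ObjEq [(0, 1808)] u.mem f s_1071a4.mem f := ObjEq.trans hobj hstep
    have hinvN : DecodeInv others frames len A stored room ysz s_1071a4.mem f := by
      apply Vorbis.Spec.vorbis_finish_frame.ff_inv_step hinv hst _ _ hun1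
        (hinv.fb.vorbis.buffers.M7.transfer (hstep.sub (by decide)))
      · intro sp hmem
        simp only [List.mem_cons, List.mem_nil_iff, or_false] at hmem
        rcases hmem with rfl
        apply StoreOK.off
        intro B hB
        have := hinv.offStack B hB
        simp only []
        omega
      · intro sp hmem
        simp only [List.mem_cons, List.mem_nil_iff, or_false] at hmem
        rcases hmem with rfl
        simp only []
        omega
    have hsameN : Mem.SameExcept [⟨(u.reg .rsp).toNat - 144, (u.reg .rsp).toNat⟩, ⟨A.B, A.B + A.L⟩] u.mem s_1071a4.mem := by
      apply hsame.trans
      apply hst.mono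
      intro sp hmem
      simp only [List.mem_cons, List.mem_nil_iff, or_false] at hmem
      rcases hmem with rfl
      intro a ha1 ha2
      exact ⟨_, List.mem_cons_self, ha1, ha2⟩
    have hi1 : (BitVec.ofNat 32 i + 1#32).toNat = i + 1 := by
      rw [BitVec.toNat_add, BitVec.toNat_ofNat]
      have e1 : (1#32).toNat = 1 := by decide
      rw [e1]
      omega
    rw [hi1] at hbr_1071a4
    have hci : (BitVec.ofNat 32 ch).toInt = (ch : Int) := by
      rw [BitVec.toInt_eq_toNat_cond, BitVec.toNat_ofNat]
      split <;> omega
    have hii : (BitVec.ofNat 32 ((i + 1) % 4294967296)).toInt = ((i + 1 : Nat) : Int) := by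
      rw [BitVec.toInt_eq_toNat_cond, BitVec.toNat_ofNat]
      split <;> omega
    rw [hci, hii] at hbr_1071a4
    refine ⟨w_rip, ⟨he0, hr, hsh, hinv0, hfp, w_rsp, ?rbx2, w_eq, ?abi2, ?_, ?_, ?_, ?_, ?_, ?_, ?_, ?_, ?_, ?_, hsameN,
      Mem.EqOn.trans hun hun1, hacc⟩, hinvN, hobjN⟩
    case rbx2 =>
      rw [w_kept.get .rbx rfl]
      exact j_rbx
    case abi2 => v_inv
    all_goals u_resolve
  · -- `++i`, `i + 1 < channels`: the head at `(i + 1, 0)`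
    refine ReachVia.done (Or.inr (Or.inl ?_))
    have hst : Mem.SameExcept [⟨(u.reg .rsp).toNat - 144, (u.reg .rsp).toNat⟩] s.mem s_1071ac.mem := by
      rw [w_mem]
      u_same
    have hun1 : ShadowUntouched s.mem s_1071ac.mem := by v_untouched
    have hstep : ObjEq [(0, 1808)] s.mem f s_1071ac.mem f := by
      apply ObjEq.of_sameExcept hst
      · intro w hwm
        simp only [List.mem_cons, List.mem_nil_iff, or_false] at hwm
        rcases hwm with rfl
        simp only []
        omega
      · intro w hwm sp hmem
        simp only [List.mem_cons, List.mem_nil_iff, or_false] at hwm hmem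
        rcases hmem with rfl
        rcases hwm with rfl
        simp only []
        omega
    have hobjN : ObjEq [(0, 1808)] u.mem f s_1071ac.mem f := ObjEq.trans hobj hstep
    have hinvN : DecodeInv others frames len A stored room ysz s_1071ac.mem f := by
      apply Vorbis.Spec.vorbis_finish_frame.ff_inv_step hinv hst _ _ hun1
        (hinv.fb.vorbis.buffers.M7.transfer (hstep.sub (by decide)))
      · intro sp hmem
        simp only [List.mem_cons, List.mem_nil_iff, or_false] at hmem
        rcases hmem with rfl
        apply StoreOK.off
        intro B hB
        have := hinv.offStack B hB
        simp only []
        omega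
      · intro sp hmem
        simp only [List.mem_cons, List.mem_nil_iff, or_false] at hmem
        rcases hmem with rfl
        simp only []
        omega
    have hsameN : Mem.SameExcept [⟨(u.reg .rsp).toNat - 144, (u.reg .rsp).toNat⟩, ⟨A.B, A.B + A.L⟩] u.mem s_1071ac.mem := by
      apply hsame.trans
      apply hst.mono
      intro sp hmem
      simp only [List.mem_cons, List.mem_nil_iff, or_false] at hmem
      rcases hmem with rfl
      intro a ha1 ha2
      exact ⟨_, List.mem_cons_self, ha1, ha2⟩
    have hi1 : (BitVec.ofNat 32 i + 1#32).toNat = i + 1 := by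
      rw [BitVec.toNat_add, BitVec.toNat_ofNat]
      have e1 : (1#32).toNat = 1 := by decide
      rw [e1]
      omega
    rw [hi1] at hbr_1071a4
    have hci : (BitVec.ofNat 32 ch).toInt = (ch : Int) := by
      rw [BitVec.toInt_eq_toNat_cond, BitVec.toNat_ofNat]
      split <;> omega
    have hii : (BitVec.ofNat 32 ((i + 1) % 4294967296)).toInt = ((i + 1 : Nat) : Int) := by
      rw [BitVec.toInt_eq_toNat_cond, BitVec.toNat_ofNat]
      split <;> omega
    rw [hci, hii] at hbr_1071a4
    refine ⟨w_rip, ⟨he0, hr, hsh, hinv0, hfp, w_rsp, ?rbx3, w_eq, ?abi3, ?_, ?_, ?_, ?_, ?_, ?_, ?_, ?_, ?_, ?_, hsameN,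
      Mem.EqOn.trans hun hun1, hacc⟩, w_r12, ?si3, ?sn3, ?sw3, hneq, ?ilt3, Nat.zero_le _, hnle, hwin, hinvN, hobjN⟩
    case rbx3 =>
      rw [w_kept.get .rbx rfl]
      exact j_rbx
    case abi3 => v_inv
    case ilt3 =>
      rw [hchv]
      omega
    all_goals u_resolve
    all_goals first | omega | (rw [hi1]; omega)
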